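-- pv_equiv track=rewrite | github.com/sagittMZ/antigravity-assistant | app/phone_worker.py | _collapse_waterfall
-- ===== SOURCE A (Python) =====
-- from typing import Optional, Any, cast, Dict, List
--
-- def _collapse_waterfall(text: str) -> str:
--     lines = text.split("\n")
--     paragraphs: List[List[str]] = [[]]
--
--     for line in lines:
--         stripped = line.strip()
--         if not stripped:
--             if paragraphs[-1]:
--                 paragraphs.append([])
--         else:
--             paragraphs[-1].append(stripped)
--
--     parts = [" ".join(para) for para in paragraphs if para]
--     return "\n\n".join(parts)
-- ===== SOURCE B (Python) =====
-- def _collapse_waterfall(text: str) -> str: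
--     acc = ""
--     sep = ""
--     for line in text.split("\n"):
--         s = line.strip()
--         if s:
--             acc += sep + s
--             sep = " "
--         elif sep:
--             sep = "\n\n"
--     return acc
-- ===== Notes on version B (the rewrite author's own statement) =====
-- stated objective: simpler
-- what changed: Replaces the paragraphs-of-lists accumulator with its paragraphs[-1] empty-sentinel trick and the two trailing join passes by a single-pass state machine that appends directly to the output string, keeping only a pending-separator state ('' / ' ' / '\n\n').
import Mathlib
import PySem

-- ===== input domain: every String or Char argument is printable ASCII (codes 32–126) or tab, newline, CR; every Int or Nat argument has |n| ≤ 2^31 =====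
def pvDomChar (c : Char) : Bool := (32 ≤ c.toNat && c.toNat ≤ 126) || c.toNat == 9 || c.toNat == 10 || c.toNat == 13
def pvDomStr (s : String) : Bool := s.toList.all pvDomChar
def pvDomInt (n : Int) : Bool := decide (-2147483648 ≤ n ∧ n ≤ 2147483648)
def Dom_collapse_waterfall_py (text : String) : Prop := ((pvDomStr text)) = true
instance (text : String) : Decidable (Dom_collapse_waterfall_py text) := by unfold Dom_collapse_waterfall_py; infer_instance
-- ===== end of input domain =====

-- B replaces A's paragraphs-of-lists accumulator (with its paragraphs[-1] sentinel and two join passes)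
-- by a single-pass state machine that builds the output string directly with a pending-separator state; objective: simpler.


-- ===== PORT A =====
-- one loop step of A: the blank-line / append-to-last-paragraph update of `paragraphs`
def pvStepA (paras : List (List (List Char))) (line : List Char) : List (List (List Char)) :=
  let stripped := PySem.Chars.strip line
  if stripped = [] then
    if paras.getLastD [] ≠ [] then paras ++ [[]] else paras
  else
    paras.dropLast ++ [paras.getLastD [] ++ [stripped]]

def collapse_waterfall_py (text : String) : String :=
  let lines := PySem.Chars.splitOn text.toList ['\n']
  let paragraphs := lines.foldl pvStepA [[]]
  let parts := (paragraphs.filter (fun p => !p.isEmpty)).map (PySem.Chars.join [' '])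
  String.ofList (PySem.Chars.join ['\n', '\n'] parts)

-- ===== PORT B =====
-- one loop step of B: state = (output so far, pending separator)
def pvStepB (st : List Char × List Char) (line : List Char) : List Char × List Char :=
  let s := PySem.Chars.strip line
  if s ≠ [] then (st.1 ++ st.2 ++ s, [' '])
  else if st.2 ≠ [] then (st.1, ['\n', '\n'])
  else st

def collapse_waterfall_py_alt (text : String) : String :=
  let st := (PySem.Chars.splitOn text.toList ['\n']).foldl pvStepB ([], [])
  String.ofList st.1

-- ===== PRECONDITION & SPEC =====
def Spec_collapse_waterfall_py (text : String) (out : String) : Prop := out = collapse_waterfall_py_alt text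
instance (text : String) (out : String) : Decidable (Spec_collapse_waterfall_py text out) := by unfold Spec_collapse_waterfall_py; infer_instance

-- ===== CLAIM (what is proved, stated in full; the proofs are below) =====
def Claim_equal_collapse_waterfall_py : Prop := ∀ (text : String), Dom_collapse_waterfall_py text → Spec_collapse_waterfall_py text (collapse_waterfall_py text)

-- ===== LEMMAS AND PROOFS =====

-- A's final rendering of a paragraphs list
def pvRender (paras : List (List (List Char))) : List Char :=
  PySem.Chars.join ['\n', '\n'] ((paras.filter (fun p => !p.isEmpty)).map (PySem.Chars.join [' ']))

-- the loop invariant relating A's paragraphs list to B's (output, separator) state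
def pvR (paras : List (List (List Char))) (st : List Char × List Char) : Prop :=
  (paras = [[]] ∧ st = ([], []))
  ∨ (∃ ps last, paras = ps ++ [last] ∧ (∀ p ∈ ps, p ≠ []) ∧ last ≠ [] ∧ st = (pvRender paras, [' ']))
  ∨ (∃ ps, paras = ps ++ [[]] ∧ ps ≠ [] ∧ (∀ p ∈ ps, p ≠ []) ∧ st = (pvRender paras, ['\n', '\n']))

lemma join_concat (sep y : List Char) (xs : List (List Char)) (h : xs ≠ []) :
    PySem.Chars.join sep (xs ++ [y]) = PySem.Chars.join sep xs ++ sep ++ y := by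
  induction xs with
  | nil => simp at h
  | cons a t ih =>
    cases t with
    | nil => simp [PySem.Chars.join_cons_cons, PySem.Chars.join_singleton]
    | cons b t' =>
      have hI := ih (by simp)
      calc PySem.Chars.join sep ((a :: b :: t') ++ [y])
          = a ++ sep ++ PySem.Chars.join sep ((b :: t') ++ [y]) := by
            simpa using PySem.Chars.join_cons_cons sep a b (t' ++ [y])
        _ = a ++ sep ++ (PySem.Chars.join sep (b :: t') ++ sep ++ y) := by rw [hI]
        _ = (a ++ sep ++ PySem.Chars.join sep (b :: t')) ++ sep ++ y := by
            simp [List.append_assoc]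
        _ = PySem.Chars.join sep (a :: b :: t') ++ sep ++ y := by
            rw [PySem.Chars.join_cons_cons]

lemma filter_all_ne (ps : List (List (List Char))) (h : ∀ p ∈ ps, p ≠ []) :
    ps.filter (fun p => !p.isEmpty) = ps := by
  apply List.filter_eq_self.mpr
  intro a ha; simpa using h a ha

lemma render_concat_nil (qs : List (List (List Char))) :
    pvRender (qs ++ [[]]) = pvRender qs := by
  simp [pvRender]

lemma render_concat (ps : List (List (List Char))) (l : List (List Char))
    (h : ∀ p ∈ ps, p ≠ []) (hl : l ≠ []) (hp : ps ≠ []) :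
    pvRender (ps ++ [l]) = pvRender ps ++ ['\n', '\n'] ++ PySem.Chars.join [' '] l := by
  simp only [pvRender, List.filter_append, filter_all_ne ps h, List.map_append]
  rw [show (List.filter (fun p => !p.isEmpty) [l]) = [l] by simp [hl]]
  rw [List.map_singleton, join_concat]
  simp [hp]

lemma step_inv (paras : List (List (List Char))) (st : List Char × List Char)
    (line : List Char) (h : pvR paras st) : pvR (pvStepA paras line) (pvStepB st line) := by
  by_cases hs : PySem.Chars.strip line = []
  · -- blank line
    rcases h with ⟨h1, h2⟩ | ⟨ps, last, hp, hne, hl, hst⟩ | ⟨ps, hp, hps, hne, hst⟩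
    · left; subst h1 h2; simp [pvStepA, pvStepB, hs]
    · right; right
      subst hp hst
      have hA : pvStepA (ps ++ [last]) line = (ps ++ [last]) ++ [[]] := by
        simp [pvStepA, hs, hl]
      have hB : pvStepB (pvRender (ps ++ [last]), [' ']) line
          = (pvRender (ps ++ [last]), ['\n', '\n']) := by
        simp [pvStepB, hs]
      refine ⟨ps ++ [last], ?_, by simp, ?_, ?_⟩
      · rw [hA]
      · intro p hpm
        rcases List.mem_append.mp hpm with h' | h'
        · exact hne p h'
        · simpa using (by simpa using h' : p = last) ▸ hl
      · rw [hA, hB, render_concat_nil]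
    · right; right
      subst hp hst
      have hA : pvStepA (ps ++ [[]]) line = ps ++ [[]] := by
        simp [pvStepA, hs]
      exact ⟨ps, by rw [hA], hps, hne, by rw [hA]; simp [pvStepB, hs]⟩
  · -- non-blank line
    rcases h with ⟨h1, h2⟩ | ⟨ps, last, hp, hne, hl, hst⟩ | ⟨ps, hp, hps, hne, hst⟩
    · right; left
      subst h1 h2
      have hA : pvStepA [[]] line = [[PySem.Chars.strip line]] := by
        simp [pvStepA, hs]
      refine ⟨[], [PySem.Chars.strip line], by rw [hA]; rfl, by simp, by simp, ?_⟩
      rw [hA]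
      simp [pvStepB, hs, pvRender, PySem.Chars.join_singleton]
    · right; left
      subst hp hst
      have hA : pvStepA (ps ++ [last]) line = ps ++ [last ++ [PySem.Chars.strip line]] := by
        simp [pvStepA, hs]
      refine ⟨ps, last ++ [PySem.Chars.strip line], by rw [hA], hne, by simp, ?_⟩
      rw [hA]
      have hB : pvStepB (pvRender (ps ++ [last]), [' ']) line
          = (pvRender (ps ++ [last]) ++ [' '] ++ PySem.Chars.strip line, [' ']) := by
        simp [pvStepB, hs]
      rw [hB]
      by_cases hps : ps = []
      · subst hps
        simp only [List.nil_append, pvRender]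
        rw [show List.filter (fun p => !p.isEmpty) [last] = [last] by simp [hl],
          show List.filter (fun p => !p.isEmpty) [last ++ [PySem.Chars.strip line]]
            = [last ++ [PySem.Chars.strip line]] by simp,
          List.map_singleton, List.map_singleton,
          PySem.Chars.join_singleton, PySem.Chars.join_singleton,
          join_concat _ _ last hl]
      · rw [render_concat ps last hne hl hps,
          render_concat ps (last ++ [PySem.Chars.strip line]) hne (by simp) hps,
          join_concat _ _ last hl]
        simp [List.append_assoc]
    · right; left
      subst hp hst
      have hA : pvStepA (ps ++ [[]]) line = ps ++ [[PySem.Chars.strip line]] := by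
        simp [pvStepA, hs]
      refine ⟨ps, [PySem.Chars.strip line], by rw [hA], hne, by simp, ?_⟩
      rw [hA, render_concat ps [PySem.Chars.strip line] hne (by simp) hps]
      simp [pvStepB, hs, render_concat_nil, PySem.Chars.join_singleton]

lemma loop_inv (lines : List (List Char)) :
    ∀ (paras : List (List (List Char))) (st : List Char × List Char),
      pvR paras st → pvR (lines.foldl pvStepA paras) (lines.foldl pvStepB st) := by
  induction lines with
  | nil => intro _ _ h; exact h
  | cons l t ih => intro paras st h; exact ih _ _ (step_inv _ _ _ h)

lemma render_final (paras : List (List (List Char))) (st : List Char × List Char)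
    (h : pvR paras st) : pvRender paras = st.1 := by
  rcases h with ⟨h1, h2⟩ | ⟨ps, last, hp, _, _, hst⟩ | ⟨ps, hp, _, _, hst⟩
  · subst h1 h2; simp [pvRender]
  · subst hp hst; rfl
  · subst hp hst; rfl

-- ===== VERDICT (by name: the statement is the Claim_ definition above) =====
theorem collapse_waterfall_py_spec : Claim_equal_collapse_waterfall_py := by
  intro text _
  have h := loop_inv (PySem.Chars.splitOn text.toList ['\n']) [[]] ([], [])
    (Or.inl ⟨rfl, rfl⟩)
  have hr := render_final _ _ h
  simp only [pvRender] at hr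
  show String.ofList _ = String.ofList _
  exact congrArg String.ofList hr
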